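-- pv_equiv track=rewrite | github.com/vedantk91/Chips_Measurements | Plot_csv.py | generate_step_diagram
-- ===== SOURCE A (Python) =====
-- def generate_step_diagram(data):
--     x = [0]
--     y = [data[0]]
--     for i in range(1, len(data)):
--         x.append(x[-1])
--         y.append(data[i])
--         x.append(x[-1] + 1)
--         y.append(data[i])
--     return x, y
-- ===== SOURCE B (Python) =====
-- def generate_step_diagram(data):
--     n = len(data)
--     xs = [i // 2 for i in range(2 * n)]
--     ys = [data[i // 2] for i in range(2 * n)]
--     return xs[:-1], ys[1:]
-- ===== Notes on version B (the rewrite author's own statement) =====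
-- stated objective: alternative
-- what changed: Replaces A's append loop with a running x[-1] accumulator by a single indexed pass over range(2n): every coordinate is the closed form i//2 (and data[i//2]), and the step shape is obtained by trimming one element off the end of x and off the front of y with slices.
import Mathlib
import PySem

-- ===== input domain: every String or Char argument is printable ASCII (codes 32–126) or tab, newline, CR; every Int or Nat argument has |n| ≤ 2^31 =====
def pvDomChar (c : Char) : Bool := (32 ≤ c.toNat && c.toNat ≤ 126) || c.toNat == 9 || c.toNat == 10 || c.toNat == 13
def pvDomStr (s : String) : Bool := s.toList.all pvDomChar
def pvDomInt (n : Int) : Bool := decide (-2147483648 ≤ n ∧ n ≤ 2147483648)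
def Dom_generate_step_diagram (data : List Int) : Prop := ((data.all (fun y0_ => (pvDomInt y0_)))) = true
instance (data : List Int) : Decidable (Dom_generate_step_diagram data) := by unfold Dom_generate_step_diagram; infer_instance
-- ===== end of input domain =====

-- B replaces A's append loop (running x[-1] accumulator) by one indexed pass over range(2n)
-- with the closed form i//2, then trims one end of each list (objective: alternative, same cost).

-- ===== PORT A =====
def generate_step_diagram (data : List Int) : List Int × List Int :=
  let x : List Int := [0]
  let y : List Int := [PySem.List.pyGetD data 0 0]   -- data[0]; Pre_ excludes the empty list
  (PySem.List.pyRange 1 (data.length : Int) 1).foldl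
    (fun (st : List Int × List Int) i =>
      let x := st.1 ++ [PySem.List.pyGetD st.1 (-1) 0]              -- x.append(x[-1])
      let y := st.2 ++ [PySem.List.pyGetD data i 0]                 -- y.append(data[i])
      let x := x ++ [PySem.List.pyGetD x (-1) 0 + 1]                -- x.append(x[-1] + 1)
      let y := y ++ [PySem.List.pyGetD data i 0]                    -- y.append(data[i])
      (x, y)) (x, y)

-- ===== PORT B =====
def generate_step_diagram_alt (data : List Int) : List Int × List Int :=
  let n : Int := data.length
  let xs := (PySem.List.pyRange 0 (2 * n) 1).map (fun i => PySem.Int.floordiv i 2)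
  let ys := (PySem.List.pyRange 0 (2 * n) 1).map
    (fun i => PySem.List.pyGetD data (PySem.Int.floordiv i 2) 0)
  (PySem.List.slice xs none (some (-1)), PySem.List.slice ys (some 1) none)

-- ===== PRECONDITION & SPEC =====
-- Python A raises IndexError on the empty list (data[0]); Pre_ excludes exactly that input.
def Pre_generate_step_diagram (data : List Int) : Prop := data ≠ []
instance (data : List Int) : Decidable (Pre_generate_step_diagram data) := by
  unfold Pre_generate_step_diagram; infer_instance
def pvWitness_generate_step_diagram : List Int := [3, 1, 4]

def Spec_generate_step_diagram (data : List Int) (out : List Int × List Int) : Prop :=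
  out = generate_step_diagram_alt data
instance (data : List Int) (out : List Int × List Int) : Decidable (Spec_generate_step_diagram data out) := by
  unfold Spec_generate_step_diagram; infer_instance

-- ===== CLAIM (what is proved, stated in full; the proofs are below) =====
def Claim_equal_generate_step_diagram : Prop := ∀ (data : List Int), Dom_generate_step_diagram data → Pre_generate_step_diagram data → Spec_generate_step_diagram data (generate_step_diagram data)

-- ===== LEMMAS AND PROOFS =====

-- last element of the closed-form x prefix, for a nonempty range
lemma pv_lastx (m : ℕ) (hm : 1 ≤ m) :
    PySem.List.pyGetD (0 :: (PySem.List.pyRange 1 (m : Int) 1).flatMap (fun i => [i - 1, i])) (-1) 0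
      = (m : Int) - 1 := by
  obtain ⟨k, rfl⟩ := Nat.exists_eq_add_of_le hm
  rcases Nat.eq_zero_or_pos k with hk | hk
  · subst hk; decide
  have h : ((1 + k : ℕ) : Int) = (k : Int) + 1 := by push_cast; ring
  rw [h, PySem.List.pyRange_one_succ_right (by exact_mod_cast hk)]
  simp [List.flatMap_append]
  rw [show (0 : Int) :: ((PySem.List.pyRange 1 (k : Int) 1).flatMap (fun i => [i - 1, i]) ++ [(k : Int) - 1, (k : Int)])
        = ((0 : Int) :: (PySem.List.pyRange 1 (k : Int) 1).flatMap (fun i => [i - 1, i]) ++ [(k : Int) - 1]) ++ [(k : Int)] by simp]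
  rw [PySem.List.pyGetD_neg_one_append_singleton]

-- A's loop, run up to bound m, in closed form
lemma pv_loop (data : List Int) (d0 : Int) (m : ℕ) :
    (PySem.List.pyRange 1 (m : Int) 1).foldl
      (fun (st : List Int × List Int) i =>
        let x := st.1 ++ [PySem.List.pyGetD st.1 (-1) 0]
        let y := st.2 ++ [PySem.List.pyGetD data i 0]
        let x := x ++ [PySem.List.pyGetD x (-1) 0 + 1]
        let y := y ++ [PySem.List.pyGetD data i 0]
        (x, y)) ([0], [d0])
    = (0 :: (PySem.List.pyRange 1 (m : Int) 1).flatMap (fun i => [i - 1, i]),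
       d0 :: (PySem.List.pyRange 1 (m : Int) 1).flatMap
         (fun i => [PySem.List.pyGetD data i 0, PySem.List.pyGetD data i 0])) := by
  induction m with
  | zero => simp [PySem.List.pyRange_one_eq_nil]
  | succ m ih =>
    rcases Nat.eq_zero_or_pos m with hm | hm
    · subst hm
      simp [PySem.List.pyRange_one_eq_nil]
    · have h : ((m + 1 : ℕ) : Int) = (m : Int) + 1 := by push_cast; ring
      rw [h, PySem.List.pyRange_one_succ_right (by exact_mod_cast hm)]
      rw [List.foldl_append, ih]
      simp only [List.foldl_cons, List.foldl_nil, List.flatMap_append]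
      have h1 := pv_lastx m hm
      rw [h1]
      rw [show (0 : Int) :: (PySem.List.pyRange 1 (m : Int) 1).flatMap (fun i => [i - 1, i]) ++ [(m : Int) - 1]
            = ((0 : Int) :: (PySem.List.pyRange 1 (m : Int) 1).flatMap (fun i => [i - 1, i])) ++ [(m : Int) - 1] by simp]
      rw [PySem.List.pyGetD_neg_one_append_singleton]
      simp

-- B's halving map over range(2m) is duplication over range(m)
lemma pv_halve (f : Int → Int) (m : ℕ) :
    (PySem.List.pyRange 0 (2 * (m : Int)) 1).map (fun i => f (PySem.Int.floordiv i 2))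
      = (PySem.List.pyRange 0 (m : Int) 1).flatMap (fun k => [f k, f k]) := by
  induction m with
  | zero => simp [PySem.List.pyRange_one_eq_nil]
  | succ m ih =>
    have h2 : (2 * ((m + 1 : ℕ) : Int)) = (2 * (m : Int) + 1) + 1 := by push_cast; ring
    have h1 : ((m + 1 : ℕ) : Int) = (m : Int) + 1 := by push_cast; ring
    rw [h2, PySem.List.pyRange_one_succ_right (by positivity),
        PySem.List.pyRange_one_succ_right (by positivity),
        h1, PySem.List.pyRange_one_succ_right (by positivity)]
    simp only [List.map_append, List.flatMap_append, ih, List.map_cons, List.map_nil]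
    have e1 : PySem.Int.floordiv (2 * (m : Int)) 2 = (m : Int) := by
      rw [PySem.Int.floordiv_eq_ediv_of_pos (by norm_num)]; omega
    have e2 : PySem.Int.floordiv (2 * (m : Int) + 1) 2 = (m : Int) := by
      rw [PySem.Int.floordiv_eq_ediv_of_pos (by norm_num)]; omega
    rw [e1, e2]; simp

-- the duplicated index list with its last element split off
lemma pv_xsplit (k : ℕ) :
    (PySem.List.pyRange 0 ((k : Int) + 1) 1).flatMap (fun j => [j, j])
      = ((0 : Int) :: (PySem.List.pyRange 1 ((k : Int) + 1) 1).flatMap (fun i => [i - 1, i])) ++ [(k : Int)] := by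
  induction k with
  | zero => decide
  | succ k ih =>
    have h : (((k + 1 : ℕ) : Int) + 1) = ((k : Int) + 1) + 1 := by push_cast; ring
    rw [h, PySem.List.pyRange_one_succ_right (a := 0) (b := (k : Int) + 1) (by positivity),
        PySem.List.pyRange_one_succ_right (a := 1) (b := (k : Int) + 1) (by omega)]
    simp only [List.flatMap_append, List.flatMap_cons, List.flatMap_nil, ih]
    simp

-- ===== VERDICT (by name: the statement is the Claim_ definition above) =====
theorem generate_step_diagram_spec : Claim_equal_generate_step_diagram := by
  intro data _ hp
  unfold Spec_generate_step_diagram generate_step_diagram generate_step_diagram_alt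
  have hm : 1 ≤ data.length := List.length_pos_of_ne_nil hp
  obtain ⟨k, hk⟩ := Nat.exists_eq_add_of_le hm
  have hkc : (data.length : Int) = (k : Int) + 1 := by rw [hk]; push_cast; ring
  dsimp only
  rw [pv_loop data (PySem.List.pyGetD data 0 0) data.length,
      pv_halve (fun i => i) data.length,
      pv_halve (fun i => PySem.List.pyGetD data i 0) data.length,
      PySem.List.slice_to_neg_one, PySem.List.slice_from_one]
  refine Prod.ext ?_ ?_
  · show _ = (_ : List Int).dropLast
    rw [hkc, pv_xsplit k, List.dropLast_concat]
  · show _ = (_ : List Int).tail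
    rw [PySem.List.pyRange_one_cons (a := 0) (by omega)]
    simp
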